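-- pv_equiv track=rewrite | github.com/rainboxup/nanobot | scripts/validate_multi_tenant.py | _is_sensitive_key
-- ===== SOURCE A (Python) =====
-- SENSITIVE_KEYS = {
--     "token",
--     "secret",
--     "app_secret",
--     "client_secret",
--     "encrypt_key",
--     "verification_token",
--     "imap_password",
--     "smtp_password",
--     "bot_token",
--     "app_token",
--     "bridge_token",
--     "access_token",
--     "claw_token",
-- }
--
-- SENSITIVE_KEY_SUFFIXES = ("token", "secret", "password", "key")
--
-- def _is_sensitive_key(key: str) -> bool:
--     normalized = str(key or "").strip().lower()
--     if not normalized: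
--         return False
--     if normalized in SENSITIVE_KEYS:
--         return True
--     return any(
--         normalized == suffix or normalized.endswith(f"_{suffix}") for suffix in SENSITIVE_KEY_SUFFIXES
--     )
-- ===== SOURCE B (Python) =====
-- _SUFFIX_SET = {"token", "secret", "password", "key"}
--
-- def _is_sensitive_key(key: str) -> bool:
--     normalized = str(key or "").strip().lower()
--     if not normalized:
--         return False
--     return normalized.rsplit("_", 1)[-1] in _SUFFIX_SET
-- ===== Notes on version B (the rewrite author's own statement) =====
-- stated objective: simpler
-- what changed: B drops the redundant SENSITIVE_KEYS set (every entry already matches the suffix rule) and replaces the per-suffix endswith scan by extracting the last underscore-delimited segment with rsplit('_', 1)[-1] and testing membership in the four-element suffix set.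
import Mathlib
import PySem

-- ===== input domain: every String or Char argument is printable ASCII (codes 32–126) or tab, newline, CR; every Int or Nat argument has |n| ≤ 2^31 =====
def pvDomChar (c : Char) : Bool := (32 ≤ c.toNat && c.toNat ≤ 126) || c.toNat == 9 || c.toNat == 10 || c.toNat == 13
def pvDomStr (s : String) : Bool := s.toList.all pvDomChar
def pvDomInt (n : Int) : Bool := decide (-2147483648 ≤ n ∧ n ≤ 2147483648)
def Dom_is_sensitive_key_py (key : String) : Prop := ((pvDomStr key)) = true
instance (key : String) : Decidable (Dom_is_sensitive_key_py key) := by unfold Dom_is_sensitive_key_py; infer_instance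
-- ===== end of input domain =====

-- B replaces the redundant SENSITIVE_KEYS set plus the per-suffix endswith scan by a single
-- lookup of the last underscore-delimited segment in the four-element suffix set (objective: simpler).

-- ===== PORT A =====
def pySensitiveKeys : PySem.Set String := PySem.Set.ofList
  ["token", "secret", "app_secret", "client_secret", "encrypt_key", "verification_token",
   "imap_password", "smtp_password", "bot_token", "app_token", "bridge_token",
   "access_token", "claw_token"]

def pySensitiveKeySuffixes : List String := ["token", "secret", "password", "key"]

def is_sensitive_key_py (key : String) : Bool :=
  let normalized := PySem.Str.lower (PySem.Str.strip key)
  if normalized == "" then false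
  else if PySem.Set.contains pySensitiveKeys normalized then true
  else pySensitiveKeySuffixes.any (fun suffix =>
    normalized == suffix || PySem.Str.endswith normalized ("_" ++ suffix))

-- ===== PORT B =====
def altSuffixSet : PySem.Set String := PySem.Set.ofList ["token", "secret", "password", "key"]

def is_sensitive_key_py_alt (key : String) : Bool :=
  let normalized := PySem.Str.lower (PySem.Str.strip key)
  if normalized == "" then false
  else
    -- normalized.rsplit("_", 1)[-1]: the segment after the last underscore (all of normalized if
    -- there is none) — ported by hand as takeWhile over the reversed characters; exact.
    let last := String.ofList ((normalized.toList.reverse.takeWhile (· ≠ '_')).reverse)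
    PySem.Set.contains altSuffixSet last

-- ===== PRECONDITION & SPEC =====
def Spec_is_sensitive_key_py (key : String) (out : Bool) : Prop := out = is_sensitive_key_py_alt key
instance (key : String) (out : Bool) : Decidable (Spec_is_sensitive_key_py key out) := by unfold Spec_is_sensitive_key_py; infer_instance

-- ===== CLAIM (what is proved, stated in full; the proofs are below) =====
def Claim_equal_is_sensitive_key_py : Prop := ∀ (key : String), Dom_is_sensitive_key_py key → Spec_is_sensitive_key_py key (is_sensitive_key_py key)

-- ===== LEMMAS AND PROOFS =====

-- takeWhile (no underscore) yields sr (itself underscore-free) iff the list is sr, or sr, an underscore, and a rest.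
theorem takeWhile_ne_underscore_eq_iff (r sr : List Char) (h : ∀ c ∈ sr, c ≠ '_') :
    r.takeWhile (· ≠ '_') = sr ↔ r = sr ∨ ∃ rest, r = sr ++ '_' :: rest := by
  have hself : sr.takeWhile (· ≠ '_') = sr :=
    List.takeWhile_eq_self_iff.mpr (by intro c hc; simpa using h c hc)
  constructor
  · intro ht
    have hd := List.takeWhile_append_dropWhile (p := (· ≠ '_')) (l := r)
    rcases hdw : r.dropWhile (· ≠ '_') with _ | ⟨c, ds⟩
    · left; rw [← hd, ht, hdw, List.append_nil]
    · right
      have hc : c = '_' := by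
        have := List.head?_dropWhile_not (p := (· ≠ '_')) (l := r)
        rw [hdw] at this; simpa using this
      exact ⟨ds, by rw [← hd, ht, hdw, hc]⟩
  · rintro (rfl | ⟨rest, rfl⟩)
    · exact hself
    · rw [List.takeWhile_append, if_pos (by rw [hself])]
      simp

-- One suffix of A's scan agrees with B's last-segment comparison against that suffix.
theorem one_suffix (n suf : String) (h : '_' ∉ suf.toList) :
    (n == suf || PySem.Str.endswith n ("_" ++ suf)) =
      decide ((n.toList.reverse.takeWhile (· ≠ '_')).reverse = suf.toList) := by
  have h' : ∀ c ∈ suf.toList, c ≠ '_' := fun c hc hceq => h (hceq ▸ hc)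
  rw [Bool.eq_iff_iff]
  simp only [Bool.or_eq_true, beq_iff_eq, decide_eq_true_eq]
  have hrev : ∀ c ∈ suf.toList.reverse, c ≠ '_' := by
    intro c hc; exact h' c (List.mem_reverse.mp hc)
  rw [List.reverse_eq_iff, takeWhile_ne_underscore_eq_iff _ _ hrev]
  constructor
  · rintro (rfl | he)
    · left; rfl
    · right
      have hs : ('_' :: suf.toList) <:+ n.toList := by
        have := (PySem.Chars.endswith_iff (s := n.toList) (p := ("_" ++ suf).toList)).mp (by simpa using he)
        simpa using this
      obtain ⟨pre, hpre⟩ := hs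
      exact ⟨pre.reverse, by rw [← hpre]; simp⟩
  · rintro (hr | ⟨rest, hr⟩)
    · left
      have : n.toList = suf.toList := by
        have := congrArg List.reverse hr; simpa using this
      exact String.ext this
    · right
      have hs : ('_' :: suf.toList) <:+ n.toList := by
        refine ⟨rest.reverse, ?_⟩
        have := congrArg List.reverse hr
        simpa using this.symm
      have : PySem.Chars.endswith n.toList ('_' :: suf.toList) = true :=
        (PySem.Chars.endswith_iff _ _).mpr hs
      simpa using this

-- A's whole suffix scan equals B's set lookup of the last segment.
theorem suffix_scan_eq_last_segment (n : String) :
    pySensitiveKeySuffixes.any (fun suffix =>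
        n == suffix || PySem.Str.endswith n ("_" ++ suffix)) =
      PySem.Set.contains altSuffixSet
        (String.ofList ((n.toList.reverse.takeWhile (· ≠ '_')).reverse)) := by
  simp only [pySensitiveKeySuffixes, List.any_cons, List.any_nil,
    one_suffix n "token" (by decide), one_suffix n "secret" (by decide),
    one_suffix n "password" (by decide), one_suffix n "key" (by decide), Bool.or_false]
  rw [Bool.eq_iff_iff]
  simp [altSuffixSet, PySem.Set.contains, PySem.Set.mem_ofList, String.ext_iff]

-- ===== VERDICT (by name: the statement is the Claim_ definition above) =====
theorem is_sensitive_key_py_spec : Claim_equal_is_sensitive_key_py := by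
  intro key _
  unfold Spec_is_sensitive_key_py
  simp only [is_sensitive_key_py, is_sensitive_key_py_alt]
  generalize PySem.Str.lower (PySem.Str.strip key) = n
  by_cases hn : n = ""
  · simp [hn]
  · have hne : (n == "") = false := by simpa using hn
    simp only [hne, Bool.false_eq_true, if_false]
    by_cases hk : PySem.Set.contains pySensitiveKeys n = true
    · rw [if_pos hk]
      have hmem : n = "token" ∨ n = "secret" ∨ n = "app_secret" ∨ n = "client_secret" ∨
          n = "encrypt_key" ∨ n = "verification_token" ∨ n = "imap_password" ∨
          n = "smtp_password" ∨ n = "bot_token" ∨ n = "app_token" ∨ n = "bridge_token" ∨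
          n = "access_token" ∨ n = "claw_token" := by
        simp [pySensitiveKeys, PySem.Set.contains, PySem.Set.mem_ofList] at hk
        tauto
      rcases hmem with rfl | rfl | rfl | rfl | rfl | rfl | rfl | rfl | rfl | rfl | rfl | rfl | rfl <;> decide
    · rw [if_neg hk]
      exact suffix_scan_eq_last_segment n
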